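-- pv_equiv track=rewrite | github.com/DiegoRG11/test_python_hack_2 | hack_4.py | fn_hack_4
-- ===== SOURCE A (Python) =====
-- def fn_hack_4(s):
--     result = s
--     remove = ["f", "b", "n"]
--     final = []
--
--     for items in result:
--         if items not in remove:
--             final.append(items)
--
--     result = "".join(final)
--     return result
-- ===== SOURCE B (Python) =====
-- def fn_hack_4(s):
--     return s.replace("f", "").replace("b", "").replace("n", "")
-- ===== Notes on version B (the rewrite author's own statement) =====
-- stated objective: simpler
-- what changed: Replaces the explicit accumulator loop with a per-character membership test by three chained str.replace calls, each scan deleting one target character.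
import Mathlib
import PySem

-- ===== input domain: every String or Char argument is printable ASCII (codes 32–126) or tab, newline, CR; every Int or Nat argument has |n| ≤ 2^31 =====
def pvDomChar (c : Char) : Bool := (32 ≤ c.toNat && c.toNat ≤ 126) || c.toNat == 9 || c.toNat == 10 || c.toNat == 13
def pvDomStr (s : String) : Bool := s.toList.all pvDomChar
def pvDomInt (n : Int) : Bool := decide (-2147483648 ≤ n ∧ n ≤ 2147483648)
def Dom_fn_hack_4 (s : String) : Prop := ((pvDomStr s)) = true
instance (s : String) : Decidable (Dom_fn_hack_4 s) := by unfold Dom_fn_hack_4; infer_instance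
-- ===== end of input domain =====

-- B: same removal of 'f','b','n' done by three chained str.replace scans instead of one
-- filtering accumulator loop; return values proved equal on Dom.
-- ===== PORT A =====
def fn_hack_4 (s : String) : String :=
  let result := s
  let remove : List Char := ['f', 'b', 'n']
  let final : List Char := []
  let final := result.toList.foldl
    (fun final items => if ¬ (remove.contains items) then final ++ [items] else final) final
  let result := String.ofList final   -- "".join(final)
  result

-- ===== PORT B =====
def fn_hack_4_alt (s : String) : String :=
  PySem.Str.replace (PySem.Str.replace (PySem.Str.replace s "f" "") "b" "") "n" ""

-- ===== PRECONDITION & SPEC =====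
def Spec_fn_hack_4 (s : String) (out : String) : Prop := out = fn_hack_4_alt s
instance (s : String) (out : String) : Decidable (Spec_fn_hack_4 s out) := by unfold Spec_fn_hack_4; infer_instance

-- ===== CLAIM (what is proved, stated in full; the proofs are below) =====
def Claim_equal_fn_hack_4 : Prop := ∀ (s : String), Dom_fn_hack_4 s → Spec_fn_hack_4 s (fn_hack_4 s)

-- ===== LEMMAS AND PROOFS =====

-- ===== VERDICT (by name: the statement is the Claim_ definition above) =====
-- replace.go with a single-char pattern and empty replacement is a filter
theorem replace_go_single (c : Char) :
    ∀ (fuel : Nat) (l acc : List Char), l.length ≤ fuel →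
      PySem.Chars.replace.go [c] [] fuel l acc = acc.reverse ++ l.filter (· != c) := by
  intro fuel
  induction fuel with
  | zero => intro l acc h; cases l with
    | nil => simp [PySem.Chars.replace.go]
    | cons a t => simp at h
  | succ n ih =>
    intro l acc h
    cases l with
    | nil => simp [PySem.Chars.replace.go]
    | cons a t =>
      simp only [PySem.Chars.replace.go, List.isPrefixOf]
      by_cases hc : c = a
      · subst hc
        simp only [BEq.rfl, Bool.true_and, if_pos]
        rw [ih _ _ (by simpa using Nat.le_of_succ_le_succ h)]
        simp
      · have hb : (c == a) = false := by simp [hc]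
        have hb' : (a == c) = false := by simp [Ne.symm hc]
        simp only [hb, Bool.false_and, if_neg Bool.false_ne_true]
        rw [ih _ _ (by simpa using Nat.le_of_succ_le_succ h)]
        simp [bne, hb']

theorem replace_single_eq_filter (c : Char) (l : List Char) :
    PySem.Chars.replace l [c] [] = l.filter (· != c) := by
  simp only [PySem.Chars.replace, List.isEmpty]
  exact replace_go_single c l.length l [] le_rfl

-- the accumulator loop of A is a filter
theorem foldl_app_filter (p : Char → Bool) (xs : List Char) : ∀ (init : List Char),
    xs.foldl (fun (final : List Char) items =>
        if ¬ p items then final ++ [items] else final) init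
      = init ++ xs.filter (fun c => !(p c)) := by
  induction xs with
  | nil => simp
  | cons a t ih =>
    intro init
    rw [List.foldl_cons, List.filter_cons]
    by_cases h : p a
    · rw [if_neg (by simp [h]), if_neg (by simp [h]), ih]
    · rw [if_pos (by simp [h]), if_pos (by simp [h]), ih]
      simp

-- chaining the three single-character filters is the combined filter
theorem filter_triple (l : List Char) :
    ((l.filter (· != 'f')).filter (· != 'b')).filter (· != 'n')
      = l.filter (fun c => !((['f','b','n'] : List Char).contains c)) := by
  rw [List.filter_filter, List.filter_filter]
  apply List.filter_congr
  intro a _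
  by_cases hf : a = 'f' <;> by_cases hb : a = 'b' <;> by_cases hn : a = 'n' <;>
    simp [hf, hb, hn]

theorem fn_hack_4_spec : Claim_equal_fn_hack_4 := by
  intro s _
  unfold Spec_fn_hack_4 fn_hack_4 fn_hack_4_alt
  simp only [PySem.Str.replace, String.toList_ofList]
  rw [show ("f" : String).toList = ['f'] from rfl, show ("b" : String).toList = ['b'] from rfl,
      show ("n" : String).toList = ['n'] from rfl, show ("" : String).toList = [] from rfl]
  rw [replace_single_eq_filter, replace_single_eq_filter, replace_single_eq_filter,
      filter_triple, foldl_app_filter]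
  simp
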